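-- pv_equiv track=rewrite | github.com/takuyaa/atcoder | abc251/abc251/c.py | solve_c
-- ===== SOURCE A (Python) =====
-- from typing import List, Set
--
-- def solve_c(S: List[str], T: List[int]) -> int:
--     assert len(S) == len(T)
--
--     subs: Set[str] = set()
--     highest_score = -1
--     highest_index = -1
--
--     for i in range(len(S)):
--         if S[i] in subs:
--             # not original
--             continue
--         subs.add(S[i])
--
--         if highest_score < T[i]:
--             highest_score = T[i]
--             highest_index = i
--
--     return highest_index + 1
-- ===== SOURCE B (Python) =====
-- from typing import List
--
-- def solve_c(S: List[str], T: List[int]) -> int: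
--     assert len(S) == len(T)
--     first = {}              # string -> index of its first occurrence
--     for i, s in enumerate(S):
--         first.setdefault(s, i)
--     # rank every index best-score-first (ties: earliest index) and return the
--     # first ranked index that is the first occurrence of its string
--     for i in sorted(range(len(S)), key=lambda i: (-T[i], i)):
--         if first[S[i]] == i:
--             return i + 1
--     return 0
-- ===== Notes on version B (the rewrite author's own statement) =====
-- stated objective: alternative
-- what changed: A streams once keeping a seen-set and a running (best score, best index) pair seeded at -1; B instead builds a first-occurrence dict via setdefault, globally sorts all indices by (-score, index), and returns the first ranked index that is the first occurrence of its string - selection by sorting, no running maximum and no sentinel.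
-- intended difference: On nonempty inputs where every first-occurrence index has score <= -1, A's -1 sentinel never updates and it returns 0 (no product), while B returns the 1-based index of the genuine highest-scoring original product, which is the intended answer since the return value is documented as an index. — e.g. on solve_c(["a", "b"], [-7, -2]): A returns 0, B returns 2
import Mathlib
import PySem

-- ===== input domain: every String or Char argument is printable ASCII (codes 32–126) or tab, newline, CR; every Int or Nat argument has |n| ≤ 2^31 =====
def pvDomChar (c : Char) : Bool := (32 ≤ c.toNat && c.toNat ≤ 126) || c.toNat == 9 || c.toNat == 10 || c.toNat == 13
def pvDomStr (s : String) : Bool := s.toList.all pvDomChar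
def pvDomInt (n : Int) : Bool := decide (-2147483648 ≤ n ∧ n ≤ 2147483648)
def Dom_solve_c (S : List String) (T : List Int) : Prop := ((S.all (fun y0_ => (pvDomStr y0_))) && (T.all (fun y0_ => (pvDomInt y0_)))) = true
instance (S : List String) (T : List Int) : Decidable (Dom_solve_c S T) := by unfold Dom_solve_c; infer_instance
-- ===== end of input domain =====

-- B replaces A's streaming seen-set + running-max loop (with a -1 sentinel) by a
-- setdefault first-occurrence dict plus a global sort of the indices by (-score, index);
-- alternative algorithm (selection by sorting), not claimed faster.


-- ===== PORT A =====
-- A's single loop: state (subs, highest_score, highest_index), branches in A's order.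
def solveCLoop (S : List String) (T : List Int) :
    List Int → PySem.Set String × Int × Int → PySem.Set String × Int × Int
  | [], st => st
  | i :: rest, (subs, hs, hi) =>
    let s := (PySem.List.pyGet? S i).getD ""
    if s ∈ subs then
      solveCLoop S T rest (subs, hs, hi)
    else
      let t := (PySem.List.pyGet? T i).getD 0
      if hs < t then
        solveCLoop S T rest (subs.add s, t, i)
      else
        solveCLoop S T rest (subs.add s, hs, hi)

def solve_c (S : List String) (T : List Int) : Int :=
  -- 'assert len(S) == len(T)': raises on mismatch, excluded by Pre_solve_c (value 0 arbitrary)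
  if S.length = T.length then
    (solveCLoop S T (PySem.List.pyRange 0 S.length 1) (PySem.Set.empty, -1, -1)).2.2 + 1
  else 0

-- ===== PORT B =====
-- B phase 1: first = {}; for i, s in enumerate(S): first.setdefault(s, i)
def bFirstDict (S : List String) : PySem.Dict String Int :=
  (PySem.List.enumerate S 0).foldl (fun d p => d.setdefault p.2 p.1) PySem.Dict.empty

-- B phase 2 loop body: 'if first[S[i]] == i: return i + 1' over the ranked indices;
-- the 'none' branch (KeyError) is unreachable since every S[i] is a key of first.
def bScan (S : List String) (first : PySem.Dict String Int) : List Int → Int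
  | [] => 0
  | i :: rest =>
    match first.get? ((PySem.List.pyGet? S i).getD "") with
    | some j => if j = i then i + 1 else bScan S first rest
    | none => bScan S first rest

def solve_c_alt (S : List String) (T : List Int) : Int :=
  if S.length = T.length then
    bScan S (bFirstDict S)
      (PySem.List.sorted2 (PySem.List.pyRange 0 S.length 1)
        (fun i => -((PySem.List.pyGet? T i).getD 0)) (fun i => i))
  else 0

-- ===== PRECONDITION & SPEC =====
-- A's assert raises AssertionError when len(S) != len(T); exactly those inputs are excluded.
def Pre_solve_c (S : List String) (T : List Int) : Prop := S.length = T.length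
instance (S : List String) (T : List Int) : Decidable (Pre_solve_c S T) := by unfold Pre_solve_c; infer_instance
def pvWitness_solve_c : List String × List Int := (["a", "b", "a"], [2, 5, 9])

-- On nonempty inputs where every first-occurrence index has score ≤ -1, A's -1 sentinel never
-- updates and it returns 0, while B returns the 1-based index of the genuine highest-scoring
-- original product — the intended answer, since the result is documented as an index.
def D_solve_c (S : List String) (T : List Int) : Prop :=
  S ≠ [] ∧ ∀ j : Nat, j < S.length → S.getD j "" ∉ S.take j → T.getD j 0 ≤ -1
instance (S : List String) (T : List Int) : Decidable (D_solve_c S T) := by unfold D_solve_c; infer_instance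

def Spec_solve_c (S : List String) (T : List Int) (out : Int) : Prop := ¬ D_solve_c S T → out = solve_c_alt S T
instance (S : List String) (T : List Int) (out : Int) : Decidable (Spec_solve_c S T out) := by unfold Spec_solve_c; infer_instance

def pvDiffWitness_solve_c : List String × List Int := (["a", "b"], [-7, -2])
def pvDiffWitnessOut_solve_c : Int × Int := (0, 2)

-- ===== CLAIM (what is proved, stated in full; the proofs are below) =====
def Claim_unchanged_solve_c : Prop := ∀ (S : List String) (T : List Int), Dom_solve_c S T → Pre_solve_c S T → Spec_solve_c S T (solve_c S T)
def Claim_changed_solve_c : Prop := Dom_solve_c (pvDiffWitness_solve_c.1) (pvDiffWitness_solve_c.2) ∧ Pre_solve_c (pvDiffWitness_solve_c.1) (pvDiffWitness_solve_c.2) ∧ D_solve_c (pvDiffWitness_solve_c.1) (pvDiffWitness_solve_c.2) ∧ solve_c (pvDiffWitness_solve_c.1) (pvDiffWitness_solve_c.2) = pvDiffWitnessOut_solve_c.1 ∧ solve_c_alt (pvDiffWitness_solve_c.1) (pvDiffWitness_solve_c.2) = pvDiffWitnessOut_solve_c.2 ∧ pvDiffWitnessOut_solve_c.1 ≠ pv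DiffWitnessOut_solve_c.2
def Claim_exact_solve_c : Prop := ∀ (S : List String) (T : List Int), Dom_solve_c S T → Pre_solve_c S T → D_solve_c S T → solve_c S T ≠ solve_c_alt S T

-- ===== LEMMAS AND PROOFS =====

-- T-value of an index, shared shorthand for the proofs
def tv (T : List Int) (i : Int) : Int := (PySem.List.pyGet? T i).getD 0

-- B's sort key, packaged as one lexicographic value
def keyf (T : List Int) (i : Int) : Int ×ₗ Int := toLex (-(tv T i), i)

-- A's argmax step on the (score, index) pair
def improve (T : List Int) (st : Int × Int) (i : Int) : Int × Int :=
  if st.1 < tv T i then (tv T i, i) else st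

-- proof-side: A's running argmax as a fold step on the index alone
def bPick (T : List Int) (b i : Int) : Int :=
  if (PySem.List.pyGet? T b).getD 0 < (PySem.List.pyGet? T i).getD 0 then i else b

-- proof-side: the list of first-occurrence indices A's seen-set effectively selects
def bFirsts (S : List String) : List Int → PySem.Set String → List Int
  | [], _ => []
  | i :: rest, seen =>
    let s := (PySem.List.pyGet? S i).getD ""
    if s ∈ seen then bFirsts S rest seen
    else i :: bFirsts S rest (seen.add s)

-- Fusion: A's single loop = the first-occurrence filter followed by a foldl of A's argmax step.
theorem fusion (S : List String) (T : List Int) :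
    ∀ (idxs : List Int) (subs : PySem.Set String) (hs hi : Int),
      (solveCLoop S T idxs (subs, hs, hi)).2 =
        (bFirsts S idxs subs).foldl (improve T) (hs, hi) := by
  intro idxs
  induction idxs with
  | nil => intro subs hs hi; rfl
  | cons i rest ih =>
    intro subs hs hi
    simp only [solveCLoop, bFirsts]
    by_cases hmem : (PySem.List.pyGet? S i).getD "" ∈ subs
    · simp [hmem, ih]
    · simp only [hmem, if_false, improve, tv, List.foldl_cons]
      by_cases hlt : hs < (PySem.List.pyGet? T i).getD 0
      · simp [hlt, ih]
      · simp [hlt, ih]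

-- A's foldl from a genuine seed (score = T-value of the seed index) is the bPick reduce.
theorem improve_seeded (T : List Int) :
    ∀ (t : List Int) (b : Int),
      t.foldl (improve T) (tv T b, b) = (tv T (t.foldl (bPick T) b), t.foldl (bPick T) b) := by
  intro t
  induction t with
  | nil => intro b; rfl
  | cons a t' ih =>
    intro b
    simp only [List.foldl_cons, improve, bPick, tv]
    by_cases h : (PySem.List.pyGet? T b).getD 0 < (PySem.List.pyGet? T a).getD 0
    · simp only [h, if_pos]; exact ih a
    · simp only [h, if_false]; exact ih b

-- the bPick reduce stays inside the candidate list
theorem pick_mem (T : List Int) :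
    ∀ (t : List Int) (b : Int), t.foldl (bPick T) b ∈ b :: t := by
  intro t
  induction t with
  | nil => intro b; exact List.mem_cons_self
  | cons a t' ih =>
    intro b
    simp only [List.foldl_cons, bPick]
    by_cases hc : (PySem.List.pyGet? T b).getD 0 < (PySem.List.pyGet? T a).getD 0
    · rw [if_pos hc]
      rcases List.mem_cons.mp (ih a) with h' | h'
      · rw [h']; exact List.mem_cons_of_mem b List.mem_cons_self
      · exact List.mem_cons_of_mem b (List.mem_cons_of_mem a h')
    · rw [if_neg hc]
      rcases List.mem_cons.mp (ih b) with h' | h'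
      · rw [h']; exact List.mem_cons_self
      · exact List.mem_cons_of_mem b (List.mem_cons_of_mem a h')

-- if every element of f has score ≤ -1, A's foldl from the sentinel stays put
theorem improve_all_neg (T : List Int) :
    ∀ (f : List Int), (∀ i ∈ f, tv T i ≤ -1) → f.foldl (improve T) (-1, -1) = (-1, -1) := by
  intro f
  induction f with
  | nil => intro _; rfl
  | cons a t ih =>
    intro h
    have ha : tv T a ≤ -1 := h a (List.mem_cons_self)
    simp only [List.foldl_cons, improve]
    rw [if_neg (not_lt.mpr ha)]
    exact ih (fun i hi => h i (List.mem_cons_of_mem a hi))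

-- the seed is irrelevant once a positive-score element exists, for seeds below the sentinel
theorem pick_seed_irrelevant (T : List Int) :
    ∀ (t : List Int) (b b' : Int), tv T b ≤ -1 → tv T b' ≤ -1 →
      (∃ i ∈ t, -1 < tv T i) → t.foldl (bPick T) b = t.foldl (bPick T) b' := by
  intro t
  induction t with
  | nil => intro b b' _ _ hex; simp at hex
  | cons a t' ih =>
    intro b b' hb hb' hex
    simp only [List.foldl_cons, bPick]
    by_cases ha : -1 < tv T a
    · have h1 : (PySem.List.pyGet? T b).getD 0 < (PySem.List.pyGet? T a).getD 0 := lt_of_le_of_lt hb ha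
      have h2 : (PySem.List.pyGet? T b').getD 0 < (PySem.List.pyGet? T a).getD 0 := lt_of_le_of_lt hb' ha
      simp [h1, h2]
    · push_neg at ha
      have hex' : ∃ i ∈ t', -1 < tv T i := by
        rcases hex with ⟨i, hi, hlt⟩
        rcases List.mem_cons.mp hi with rfl | hi'
        · exact absurd hlt (not_lt.mpr ha)
        · exact ⟨i, hi', hlt⟩
      have s1 : tv T (if (PySem.List.pyGet? T b).getD 0 < (PySem.List.pyGet? T a).getD 0 then a else b) ≤ -1 := by
        split <;> [exact ha; exact hb]
      have s2 : tv T (if (PySem.List.pyGet? T b').getD 0 < (PySem.List.pyGet? T a).getD 0 then a else b') ≤ -1 := by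
        split <;> [exact ha; exact hb']
      exact ih _ _ s1 s2 hex'

-- with some positive score present, A's foldl from the sentinel is exactly the bPick reduce
theorem improve_eq_pick (T : List Int) :
    ∀ (t : List Int) (h : Int), (∃ i ∈ h :: t, -1 < tv T i) →
      ((h :: t).foldl (improve T) (-1, -1)).2 = t.foldl (bPick T) h := by
  intro t
  induction t with
  | nil =>
    intro h hex
    rcases hex with ⟨i, hi, hlt⟩
    simp only [List.mem_singleton] at hi
    subst hi
    simp only [List.foldl_cons, List.foldl_nil, improve]
    rw [if_pos hlt]
  | cons a t' ih =>
    intro h hex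
    by_cases hh : -1 < tv T h
    · have e1 : (h :: a :: t').foldl (improve T) (-1, -1) = (a :: t').foldl (improve T) (tv T h, h) := by
        simp only [List.foldl_cons, improve]
        rw [if_pos hh]
      rw [e1, improve_seeded]
    · push_neg at hh
      have e1 : (h :: a :: t').foldl (improve T) (-1, -1) = (a :: t').foldl (improve T) (-1, -1) := by
        simp only [List.foldl_cons, improve]
        rw [if_neg (not_lt.mpr hh)]
      have hex' : ∃ i ∈ a :: t', -1 < tv T i := by
        rcases hex with ⟨i, hi, hlt⟩
        rcases List.mem_cons.mp hi with rfl | hi'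
        · exact absurd hlt (not_lt.mpr hh)
        · exact ⟨i, hi', hlt⟩
      rw [e1, ih a hex']
      simp only [List.foldl_cons, bPick]
      by_cases hc : (PySem.List.pyGet? T h).getD 0 < (PySem.List.pyGet? T a).getD 0
      · rw [if_pos hc]
      · rw [if_neg hc]
        push_neg at hc
        rcases lt_or_ge (-1 : Int) (tv T a) with ha | ha
        · exact absurd (lt_of_lt_of_le ha hc) (not_lt.mpr hh)
        · have hex'' : ∃ i ∈ t', -1 < tv T i := by
            rcases hex' with ⟨i, hi, hlt⟩
            rcases List.mem_cons.mp hi with rfl | hi'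
            · exact absurd hlt (not_lt.mpr ha)
            · exact ⟨i, hi', hlt⟩
          exact pick_seed_irrelevant T t' a h ha hh hex''

-- bFirsts is a sublist of the scanned index list
theorem bFirsts_sublist (S : List String) :
    ∀ (idxs : List Int) (seen : PySem.Set String), (bFirsts S idxs seen).Sublist idxs := by
  intro idxs
  induction idxs with
  | nil => intro seen; simp [bFirsts]
  | cons j rest ih =>
    intro seen
    simp only [bFirsts]
    by_cases hmem : (PySem.List.pyGet? S j).getD "" ∈ seen
    · rw [if_pos hmem]; exact (ih seen).cons j
    · rw [if_neg hmem]; exact (ih _).cons₂ j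

-- Membership in the first-occurrence list ⟷ the closed-form first-occurrence condition,
-- given that 'seen' holds exactly the strings of the already-scanned prefix S.take k.
theorem bFirsts_mem_iff (S : List String) :
    ∀ (m : Nat) (k : Nat) (seen : PySem.Set String),
      k + m = S.length →
      (∀ s : String, s ∈ seen ↔ s ∈ S.take k) →
      ∀ (i : Int),
        (i ∈ bFirsts S (PySem.List.pyRange (k : Int) (S.length : Int) 1) seen ↔
          ∃ j : Nat, i = (j : Int) ∧ k ≤ j ∧ j < S.length ∧ S.getD j "" ∉ S.take j) := by
  intro m
  induction m with
  | zero =>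
    intro k seen hk _ i
    have hkk : (k : Int) ≥ (S.length : Int) := by omega
    rw [PySem.List.pyRange_one_eq_nil hkk]
    simp only [bFirsts, List.not_mem_nil, false_iff]
    rintro ⟨j, _, h1, h2, _⟩
    omega
  | succ m ih =>
    intro k seen hk hseen i
    have hlt : (k : Int) < (S.length : Int) := by exact_mod_cast (by omega : k < S.length)
    rw [PySem.List.pyRange_one_cons hlt]
    have hget : (PySem.List.pyGet? S (k : Int)).getD "" = S.getD k "" := by
      have hkl : k < S.length := by omega
      rw [PySem.List.pyGet?_natCast]
      simp [List.getD_eq_getElem?_getD]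
    have hstep : ((k : Int) + 1) = ((k + 1 : Nat) : Int) := by push_cast; ring
    simp only [bFirsts, hget]
    by_cases hmem : S.getD k "" ∈ seen
    · rw [if_pos hmem, hstep]
      have hseen' : ∀ s : String, s ∈ seen ↔ s ∈ S.take (k + 1) := by
        intro s
        rw [hseen s]
        constructor
        · intro h
          rw [List.take_add_one]
          exact List.mem_append.mpr (Or.inl h)
        · intro h
          have hkl : k < S.length := by omega
          rw [List.take_succ] at h
          rcases List.mem_append.mp h with h' | h'
          · exact h'
          · simp [List.getElem?_eq_getElem hkl] at h'
            subst h'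
            have := (hseen (S.getD k "")).mp hmem
            simpa [List.getD_eq_getElem?_getD, List.getElem?_eq_getElem hkl] using this
      rw [ih (k+1) seen (by omega) hseen' i]
      constructor
      · rintro ⟨j, rfl, h1, h2, h3⟩; exact ⟨j, rfl, by omega, h2, h3⟩
      · rintro ⟨j, rfl, h1, h2, h3⟩
        refine ⟨j, rfl, ?_, h2, h3⟩
        rcases Nat.eq_or_lt_of_le h1 with heq | h1'
        · exfalso
          subst heq
          exact h3 ((hseen _).mp hmem)
        · omega
    · rw [if_neg hmem, hstep]
      have hseen' : ∀ s : String, s ∈ seen.add (S.getD k "") ↔ s ∈ S.take (k + 1) := by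
        intro s
        rw [PySem.Set.mem_add, hseen s]
        have hkl : k < S.length := by omega
        rw [List.take_add_one, List.mem_append, List.getElem?_eq_getElem hkl, List.getD_eq_getElem?_getD, List.getElem?_eq_getElem hkl]
        simp [or_comm]
      rw [List.mem_cons, ih (k+1) _ (by omega) hseen' i]
      have hknotin : S.getD k "" ∉ S.take k := fun h => hmem ((hseen _).mpr h)
      constructor
      · rintro (rfl | ⟨j, rfl, h1, h2, h3⟩)
        · exact ⟨k, rfl, le_refl k, by omega, hknotin⟩
        · exact ⟨j, rfl, by omega, h2, h3⟩
      · rintro ⟨j, rfl, h1, h2, h3⟩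
        rcases Nat.eq_or_lt_of_le h1 with heq | h1'
        · left; rw [heq]
        · right; exact ⟨j, rfl, h1', h2, h3⟩

-- the first-occurrence condition of D_ ⟷ all elements of the firsts list have score ≤ -1
theorem firsts_all_neg_iff (S : List String) (T : List Int) (hlen : S.length = T.length) :
    ((∀ i ∈ bFirsts S (PySem.List.pyRange 0 (S.length : Int) 1) PySem.Set.empty, tv T i ≤ -1) ↔
      (∀ j : Nat, j < S.length → S.getD j "" ∉ S.take j → T.getD j 0 ≤ -1)) := by
  have hmem := bFirsts_mem_iff S S.length 0 PySem.Set.empty (by omega)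
    (by intro s; simp [PySem.Set.empty])
  simp only [Nat.cast_zero] at hmem
  have htv : ∀ j : Nat, j < S.length → tv T (j : Int) = T.getD j 0 := by
    intro j hj
    have hjT : j < T.length := by omega
    simp only [tv]
    rw [PySem.List.pyGet?_natCast]
    simp [List.getElem?_eq_getElem hjT, List.getD_eq_getElem?_getD]
  constructor
  · intro h j hj hfirst
    have : (j : Int) ∈ bFirsts S (PySem.List.pyRange 0 (S.length : Int) 1) PySem.Set.empty := by
      rw [hmem]
      exact ⟨j, rfl, Nat.zero_le j, hj, hfirst⟩
    have := h _ this
    rwa [htv j hj] at this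
  · intro h i hi
    rw [hmem] at hi
    rcases hi with ⟨j, rfl, _, hj, hfirst⟩
    rw [htv j hj]
    exact h j hj hfirst

-- (everything above is the A-side analysis; the B-side lemmas follow)

-- B's setdefault fold looked up: first come, first kept — it is list.index
theorem fd_get (s : String) : ∀ (S : List String) (a : Int) (d : PySem.Dict String Int),
    ((PySem.List.enumerate S a).foldl (fun d p => d.setdefault p.2 p.1) d).get? s
      = if d.contains s then d.get? s
        else (PySem.List.index? S s).map (fun k : Nat => ((k : Int) + a)) := by
  intro S
  induction S with
  | nil =>
    intro a d
    simp only [PySem.List.enumerate_nil, List.foldl_nil]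
    by_cases h : d.contains s
    · rw [if_pos h]
    · rw [if_neg h]
      simp [PySem.Dict.get?_eq_none_iff_contains, h, PySem.List.index?_eq_idxOf?]
  | cons x xs ih =>
    intro a d
    rw [PySem.List.enumerate_cons, List.foldl_cons, ih]
    by_cases hx : d.contains x
    · rw [PySem.Dict.setdefault_of_contains _ _ hx]
      by_cases hs : d.contains s
      · rw [if_pos hs, if_pos hs]
      · rw [if_neg hs, if_neg hs]
        have hne : x ≠ s := fun h => hs (h ▸ hx)
        rw [PySem.List.index?_cons_of_ne _ hne, Option.map_map]
        congr 1
        funext k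
        simp only [Function.comp_apply]
        push_cast; ring
    · rw [PySem.Dict.setdefault_of_not_contains _ _ (by simpa using hx)]
      by_cases hsx : s = x
      · subst hsx
        rw [if_pos (PySem.Dict.contains_insert_self _ _ _), PySem.Dict.get?_insert_self,
          if_neg hx, PySem.List.index?_cons_self]
        simp
      · have hc : (d.insert x a).contains s = d.contains s := by
          rw [PySem.Dict.contains_insert]
          simp [hsx]
        rw [hc]
        by_cases hds : d.contains s
        · rw [if_pos hds, if_pos hds, PySem.Dict.get?_insert_of_ne _ _ hsx]
        · rw [if_neg hds, if_neg hds, PySem.List.index?_cons_of_ne _ (fun h => hsx h.symm),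
            Option.map_map]
          congr 1
          funext k
          simp only [Function.comp_apply]
          push_cast; ring

-- B's dict membership test at a valid index ⟷ the first-occurrence condition
theorem fd_cond (S : List String) (j : Nat) (hj : j < S.length) :
    ((bFirstDict S).get? ((PySem.List.pyGet? S (j : Int)).getD "") = some (j : Int)
      ↔ S.getD j "" ∉ S.take j) := by
  have hget : (PySem.List.pyGet? S (j : Int)).getD "" = S.getD j "" := by
    rw [PySem.List.pyGet?_natCast]
    simp [List.getD_eq_getElem?_getD]
  rw [hget]
  unfold bFirstDict
  rw [fd_get (S.getD j "") S 0 PySem.Dict.empty]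
  rw [if_neg (by simp [PySem.Dict.contains_empty])]
  have hmap : ∀ (o : Option Nat), (o.map (fun k : Nat => ((k : Int) + 0)) = some (j : Int)) ↔ o = some j := by
    intro o
    cases o with
    | none => simp
    | some k =>
      simp only [Option.map_some, Option.some.injEq]
      omega
  rw [hmap, PySem.List.index?_eq_idxOf?, List.idxOf?_eq_some_iff]
  constructor
  · rintro ⟨hlt, hval, hprev⟩ hmem
    rcases List.mem_take_iff_getElem.mp hmem with ⟨i, hi, hival⟩
    exact hprev i (by omega) hival
  · intro hnotin
    refine ⟨hj, ?_, ?_⟩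
    · simp [List.getD_eq_getElem?_getD, List.getElem?_eq_getElem hj]
    · intro i hij hval
      exact hnotin (List.mem_take_iff_getElem.mpr ⟨i, by omega, hval⟩)

-- the bPick reduce over a strictly increasing list minimises B's lexicographic key
theorem pick_key_min (T : List Int) :
    ∀ (l : List Int) (b : Int), (b :: l).Pairwise (· < ·) →
      ∀ x ∈ b :: l, keyf T (l.foldl (bPick T) b) ≤ keyf T x := by
  intro l
  induction l with
  | nil =>
    intro b _ x hx
    simp only [List.mem_singleton] at hx
    subst hx
    exact le_refl _
  | cons a l' ih =>
    intro b hp x hx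
    have hba : b < a := (List.pairwise_cons.mp hp).1 a List.mem_cons_self
    have hp' : (a :: l').Pairwise (· < ·) := (List.pairwise_cons.mp hp).2
    have hpb : (b :: l').Pairwise (· < ·) := by
      rcases List.pairwise_cons.mp hp with ⟨h1, h2⟩
      rcases List.pairwise_cons.mp h2 with ⟨h3, h4⟩
      exact List.pairwise_cons.mpr ⟨fun y hy => h1 y (List.mem_cons_of_mem a hy), h4⟩
    simp only [List.foldl_cons, bPick]
    by_cases hc : (PySem.List.pyGet? T b).getD 0 < (PySem.List.pyGet? T a).getD 0
    · rw [if_pos hc]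
      have hkey_ab : keyf T a < keyf T b := by
        simp only [keyf, Prod.Lex.lt_iff, ofLex_toLex]
        left; simp only [tv]; omega
      rcases List.mem_cons.mp hx with rfl | hx'
      · exact le_of_lt (lt_of_le_of_lt (ih a hp' a List.mem_cons_self) hkey_ab)
      · exact ih a hp' x hx'
    · rw [if_neg hc]
      push_neg at hc
      have hkey_ba : keyf T b < keyf T a := by
        simp only [keyf, Prod.Lex.lt_iff, ofLex_toLex, tv]
        rcases lt_or_eq_of_le hc with h | h
        · left; omega
        · right; exact ⟨by omega, hba⟩
      have hmin := ih b hpb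
      rcases List.mem_cons.mp hx with rfl | hx'
      · exact hmin x List.mem_cons_self
      · rcases List.mem_cons.mp hx' with rfl | hx''
        · exact le_of_lt (lt_of_le_of_lt (hmin b List.mem_cons_self) hkey_ba)
        · exact hmin x (List.mem_cons_of_mem b hx'')

-- B's two-key sort IS the one-key sort under the packaged lexicographic key
theorem sorted2_eq_sorted_lex (T : List Int) (xs : List Int) :
    PySem.List.sorted2 xs (fun i => -((PySem.List.pyGet? T i).getD 0)) (fun i => i) =
      PySem.List.sorted xs (keyf T) := by
  show List.foldl (fun acc x => PySem.List.insertBy _ x acc) [] xs =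
    List.foldl (fun acc x => PySem.List.insertBy _ x acc) [] xs
  congr 1
  funext acc x
  congr 1
  funext a b
  simp only [keyf, Prod.Lex.lt_iff, ofLex_toLex, tv]
  by_cases h1 : -((PySem.List.pyGet? T a).getD 0) < -((PySem.List.pyGet? T b).getD 0)
  · simp [h1, not_lt.mpr (le_of_lt h1)]
  · by_cases h2 : -((PySem.List.pyGet? T b).getD 0) < -((PySem.List.pyGet? T a).getD 0)
    · simp [h1, h2, ne_of_gt h2]
    · have heq : -((PySem.List.pyGet? T a).getD 0) = -((PySem.List.pyGet? T b).getD 0) :=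
        le_antisymm (not_lt.mp h2) (not_lt.mp h1)
      simp [h1, h2, heq]

-- the scan over a strictly key-sorted list returns the key-minimal accepted index, +1
theorem bScan_eq (S : List String) (first : PySem.Dict String Int) (T : List Int) (m : Int) :
    ∀ zs : List Int, zs.Pairwise (fun a b => keyf T a < keyf T b) → m ∈ zs →
      first.get? ((PySem.List.pyGet? S m).getD "") = some m →
      (∀ x ∈ zs, first.get? ((PySem.List.pyGet? S x).getD "") = some x → keyf T m ≤ keyf T x) →
      bScan S first zs = m + 1 := by
  intro zs
  induction zs with
  | nil => intro _ hm; exact absurd hm (List.not_mem_nil)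
  | cons z rest ih =>
    intro hp hm hcond hmin
    rcases List.pairwise_cons.mp hp with ⟨hz, hp'⟩
    by_cases hcz : first.get? ((PySem.List.pyGet? S z).getD "") = some z
    · -- z is accepted: scan returns z + 1, and z must be m
      have hzm : z = m := by
        rcases List.mem_cons.mp hm with rfl | hm'
        · rfl
        · exfalso
          have h1 : keyf T z < keyf T m := hz m hm'
          have h2 : keyf T m ≤ keyf T z := hmin z List.mem_cons_self hcz
          exact absurd (lt_of_le_of_lt h2 h1) (lt_irrefl _)
      subst hzm
      simp [bScan, hcz]
    · -- z rejected: m ∈ rest, recurse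
      have hm' : m ∈ rest := by
        rcases List.mem_cons.mp hm with rfl | hm'
        · exact absurd hcond hcz
        · exact hm'
      have hrec := ih hp' hm' hcond (fun x hx hcx => hmin x (List.mem_cons_of_mem z hx) hcx)
      rcases hj : first.get? ((PySem.List.pyGet? S z).getD "") with _ | j
      · simp only [bScan, hj]
        exact hrec
      · have hne : j ≠ z := fun h => hcz (h ▸ hj)
        simp only [bScan, hj]
        rw [if_neg hne]
        exact hrec

-- the main B-side theorem: whenever the firsts list is h :: t, B returns its bPick reduce + 1
theorem solve_c_alt_eq (S : List String) (T : List Int) (hlen : S.length = T.length)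
    (h : Int) (t : List Int)
    (hfl : bFirsts S (PySem.List.pyRange 0 (S.length : Int) 1) PySem.Set.empty = h :: t) :
    solve_c_alt S T = t.foldl (bPick T) h + 1 := by
  set firsts := bFirsts S (PySem.List.pyRange 0 (S.length : Int) 1) PySem.Set.empty with hfdef
  set m := t.foldl (bPick T) h with hmdef
  have hfsub : firsts.Sublist (PySem.List.pyRange 0 (S.length : Int) 1) := bFirsts_sublist S _ _
  have hfpw : firsts.Pairwise (· < ·) :=
    (PySem.List.pairwise_lt_pyRange_one 0 (S.length : Int)).sublist hfsub
  have hm_mem : m ∈ firsts := by rw [hfl]; exact pick_mem T t h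
  have hmin : ∀ x ∈ firsts, keyf T m ≤ keyf T x := by
    rw [hfl] at hfpw ⊢
    exact pick_key_min T t h hfpw
  have hmem_iff := bFirsts_mem_iff S S.length 0 PySem.Set.empty (by omega)
    (by intro s; simp [PySem.Set.empty])
  simp only [Nat.cast_zero] at hmem_iff
  have hperm : (PySem.List.sorted (PySem.List.pyRange 0 (S.length : Int) 1) (keyf T)).Perm
      (PySem.List.pyRange 0 (S.length : Int) 1) := by
    rw [← sorted2_eq_sorted_lex]
    exact PySem.List.sorted2_perm _ _ _ false
  have hz_pw_le : (PySem.List.sorted (PySem.List.pyRange 0 (S.length : Int) 1) (keyf T)).Pairwise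
      (fun a b => keyf T a ≤ keyf T b) := PySem.List.sorted_pairwise _ _
  have hz_nodup : (PySem.List.sorted (PySem.List.pyRange 0 (S.length : Int) 1) (keyf T)).Nodup :=
    hperm.nodup_iff.mpr (PySem.List.nodup_pyRange_one 0 (S.length : Int))
  have hz_pw : (PySem.List.sorted (PySem.List.pyRange 0 (S.length : Int) 1) (keyf T)).Pairwise
      (fun a b => keyf T a < keyf T b) := by
    have hand := List.Pairwise.and hz_pw_le hz_nodup
    exact hand.imp (by
      rintro a b ⟨hle, hne⟩
      rcases lt_or_eq_of_le hle with hlt | heq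
      · exact hlt
      · exfalso
        apply hne
        have := congrArg (fun p => (ofLex p).2) heq
        simpa [keyf, ofLex_toLex] using this)
  have hmz : m ∈ PySem.List.sorted (PySem.List.pyRange 0 (S.length : Int) 1) (keyf T) :=
    hperm.mem_iff.mpr (hfsub.subset hm_mem)
  -- the acceptance condition ⟷ membership in firsts, for range elements
  have hcond_iff : ∀ x ∈ PySem.List.pyRange 0 (S.length : Int) 1,
      ((bFirstDict S).get? ((PySem.List.pyGet? S x).getD "") = some x ↔ x ∈ firsts) := by
    intro x hx
    rcases PySem.List.mem_pyRange_one.mp hx with ⟨hx0, hxn⟩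
    obtain ⟨j, rfl⟩ : ∃ j : Nat, x = (j : Int) := ⟨x.toNat, (Int.toNat_of_nonneg hx0).symm⟩
    have hj : j < S.length := by exact_mod_cast hxn
    rw [fd_cond S j hj, hfdef, hmem_iff]
    constructor
    · intro hno; exact ⟨j, rfl, Nat.zero_le j, hj, hno⟩
    · rintro ⟨j', hj', _, _, hno⟩
      have : j' = j := by omega
      subst this; exact hno
  have hcond_m : (bFirstDict S).get? ((PySem.List.pyGet? S m).getD "") = some m :=
    (hcond_iff m (hfsub.subset hm_mem)).mpr hm_mem
  have hmin' : ∀ x ∈ PySem.List.sorted (PySem.List.pyRange 0 (S.length : Int) 1) (keyf T),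
      (bFirstDict S).get? ((PySem.List.pyGet? S x).getD "") = some x →
      keyf T m ≤ keyf T x := by
    intro x hx hcx
    have hxr : x ∈ PySem.List.pyRange 0 (S.length : Int) 1 := hperm.mem_iff.mp hx
    exact hmin x ((hcond_iff x hxr).mp hcx)
  unfold solve_c_alt
  rw [if_pos hlen, sorted2_eq_sorted_lex]
  exact bScan_eq S (bFirstDict S) T m _ hz_pw hmz hcond_m hmin'

-- ===== VERDICT (by name: the statement is the Claim_ definition above) =====
theorem solve_c_spec : Claim_unchanged_solve_c := by
  intro S T _ hpre hnd
  have hlen : S.length = T.length := hpre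
  rcases hS : S with _ | ⟨s0, Srest⟩
  · subst hS
    have : T = [] := List.length_eq_zero_iff.mp (by simp at hlen; omega)
    subst this
    decide
  · rw [← hS]
    have hSne : S ≠ [] := by rw [hS]; simp
    rcases hfl : bFirsts S (PySem.List.pyRange 0 (S.length : Int) 1) PySem.Set.empty with _ | ⟨h, t⟩
    · -- impossible: S nonempty means index 0 is collected
      exfalso
      have h0 : (0 : Int) < (S.length : Int) := by
        have : 0 < S.length := List.length_pos_iff.mpr hSne
        exact_mod_cast this
      rw [PySem.List.pyRange_one_cons h0] at hfl
      simp [bFirsts, PySem.Set.empty] at hfl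
    · have hex : ∃ i ∈ h :: t, -1 < tv T i := by
        by_contra hall
        push_neg at hall
        apply hnd
        refine ⟨hSne, ?_⟩
        rw [← firsts_all_neg_iff S T hlen, hfl]
        intro i hi
        exact le_of_not_gt (by exact_mod_cast fun hc => absurd hc (not_lt.mpr (hall i hi)))
      show solve_c S T = solve_c_alt S T
      unfold solve_c
      rw [if_pos hlen, fusion, hfl, improve_eq_pick T t h hex,
        solve_c_alt_eq S T hlen h t hfl]

theorem solve_c_changed : Claim_changed_solve_c := by unfold Claim_changed_solve_c; decide

theorem solve_c_tight : Claim_exact_solve_c := by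
  intro S T _ hpre hd
  rcases hd with ⟨hSne, hneg⟩
  have hlen : S.length = T.length := hpre
  rcases hfl : bFirsts S (PySem.List.pyRange 0 (S.length : Int) 1) PySem.Set.empty with _ | ⟨h, t⟩
  · exfalso
    have h0 : (0 : Int) < (S.length : Int) := by
      have : 0 < S.length := List.length_pos_iff.mpr hSne
      exact_mod_cast this
    rw [PySem.List.pyRange_one_cons h0] at hfl
    simp [bFirsts, PySem.Set.empty] at hfl
  · have hall : ∀ i ∈ h :: t, tv T i ≤ -1 := by
      have hthis := (firsts_all_neg_iff S T hlen).mpr hneg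
      rw [hfl] at hthis
      exact hthis
    have hA : solve_c S T = 0 := by
      unfold solve_c
      rw [if_pos hlen, fusion, hfl, improve_all_neg T (h :: t) hall]
      decide
    have hB : solve_c_alt S T = t.foldl (bPick T) h + 1 := solve_c_alt_eq S T hlen h t hfl
    have hb : t.foldl (bPick T) h ∈ PySem.List.pyRange 0 (S.length : Int) 1 :=
      (bFirsts_sublist S _ _).subset (hfl ▸ pick_mem T t h)
    have hge : 0 ≤ t.foldl (bPick T) h := ((PySem.List.mem_pyRange_one).mp hb).1
    rw [hA, hB]
    omega
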